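-- pv_equiv track=rewrite | github.com/kartal788/dfbot | Backend/fastapi/routes/stremio_routes.py | detect_platform_from_genres
-- ===== SOURCE A (Python) =====
-- from typing import Optional
--
-- PLATFORM_GENRES = {
--     "netflix": ["Netflix"],
--     "amazon": ["Amazon"],
--     "disney": ["Disney"],
--     "hbo": ["HBO", "Hbomax", "BluTV"],
--     "tvplus": ["Tv+"]
-- }
--
-- def detect_platform_from_genres(genres: list[str]) -> Optional[str]:
--     if not genres:
--         return None
--
--     for platform, names in PLATFORM_GENRES.items():
--         for g in genres:
--             if g in names:
--                 return platform
--     return None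
-- ===== SOURCE B (Python) =====
-- from typing import Optional
--
-- PLATFORM_GENRES = {
--     "netflix": ["Netflix"],
--     "amazon": ["Amazon"],
--     "disney": ["Disney"],
--     "hbo": ["HBO", "Hbomax", "BluTV"],
--     "tvplus": ["Tv+"]
-- }
--
-- def detect_platform_from_genres(genres: list[str]) -> Optional[str]:
--     reverse = {name: platform for platform, names in PLATFORM_GENRES.items() for name in names}
--     matched = {reverse[g] for g in genres if g in reverse}
--     for platform in PLATFORM_GENRES:
--         if platform in matched:
--             return platform
--     return None
-- ===== Notes on version B (the rewrite author's own statement) =====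
-- stated objective: idiomatic
-- what changed: Replaces the nested platform-by-genre scan with a precomputed reverse index (genre name -> platform), one pass over the genres building the matched set, and a final scan over the platform keys in declared order (which preserves A's platform-priority tie-breaking).
import Mathlib
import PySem

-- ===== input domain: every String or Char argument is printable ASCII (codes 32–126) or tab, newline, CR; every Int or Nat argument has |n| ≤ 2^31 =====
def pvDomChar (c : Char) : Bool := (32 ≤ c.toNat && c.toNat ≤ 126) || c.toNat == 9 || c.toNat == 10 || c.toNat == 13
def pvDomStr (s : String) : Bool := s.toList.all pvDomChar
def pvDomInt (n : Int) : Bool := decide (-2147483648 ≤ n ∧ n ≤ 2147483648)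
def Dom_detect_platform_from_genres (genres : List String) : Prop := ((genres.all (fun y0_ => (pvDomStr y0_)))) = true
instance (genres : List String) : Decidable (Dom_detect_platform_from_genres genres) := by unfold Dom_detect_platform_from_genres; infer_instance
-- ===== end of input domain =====

-- B replaces A's nested platform-by-genre scan with a reverse index (genre name -> platform),
-- one pass building the matched set, then a scan of the platform keys in declared order (idiomatic).


-- ===== PORT A =====
def PLATFORM_GENRES : List (String × List String) :=
  [("netflix", ["Netflix"]), ("amazon", ["Amazon"]), ("disney", ["Disney"]),
   ("hbo", ["HBO", "Hbomax", "BluTV"]), ("tvplus", ["Tv+"])]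

-- inner 'for g in genres: if g in names: return platform'
def aInner (platform : String) (names : List String) : List String → Option String
  | [] => none
  | g :: rest => if names.contains g then some platform else aInner platform names rest

-- outer 'for platform, names in PLATFORM_GENRES.items(): …'
def aOuter (genres : List String) : List (String × List String) → Option String
  | [] => none
  | (platform, names) :: rest =>
      match aInner platform names genres with
      | some p => some p
      | none => aOuter genres rest

def detect_platform_from_genres (genres : List String) : Option String :=
  if genres = [] then none
  else aOuter genres PLATFORM_GENRES

-- ===== PORT B =====
-- reverse = {name: platform for platform, names in PLATFORM_GENRES.items() for name in names}
def bReverse : PySem.Dict String String :=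
  PLATFORM_GENRES.foldl
    (fun d pn => pn.2.foldl (fun d n => d.insert n pn.1) d)
    PySem.Dict.empty

-- matched = {reverse[g] for g in genres if g in reverse}
def bMatched (genres : List String) : PySem.Set String :=
  genres.foldl
    (fun s g => match bReverse.get? g with
       | some p => PySem.Set.add s p
       | none => s)
    PySem.Set.empty

-- 'for platform in PLATFORM_GENRES: if platform in matched: return platform'
def bScan (matched : PySem.Set String) : List String → Option String
  | [] => none
  | p :: rest => if PySem.Set.contains matched p then some p else bScan matched rest

def detect_platform_from_genres_alt (genres : List String) : Option String :=
  bScan (bMatched genres) (PLATFORM_GENRES.map Prod.fst)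

-- ===== PRECONDITION & SPEC =====
def Spec_detect_platform_from_genres (genres : List String) (out : Option String) : Prop := out = detect_platform_from_genres_alt genres
instance (genres : List String) (out : Option String) : Decidable (Spec_detect_platform_from_genres genres out) := by unfold Spec_detect_platform_from_genres; infer_instance

-- ===== CLAIM (what is proved, stated in full; the proofs are below) =====
def Claim_equal_detect_platform_from_genres : Prop := ∀ (genres : List String), Dom_detect_platform_from_genres genres → Spec_detect_platform_from_genres genres (detect_platform_from_genres genres)

-- ===== LEMMAS AND PROOFS =====

-- A's inner loop is a guarded any
theorem aInner_eq (platform : String) (names gs : List String) :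
    aInner platform names gs = if gs.any (fun g => names.contains g) then some platform else none := by
  induction gs with
  | nil => rfl
  | cons g rest ih =>
      by_cases h : g ∈ names <;> simp [aInner, ih, h]

-- the reverse index as an if-chain
theorem get?_bReverse (g : String) :
    bReverse.get? g =
      if ("Netflix" : String) == g then some "netflix"
      else if ("Amazon" : String) == g then some "amazon"
      else if ("Disney" : String) == g then some "disney"
      else if ("HBO" : String) == g then some "hbo"
      else if ("Hbomax" : String) == g then some "hbo"
      else if ("BluTV" : String) == g then some "hbo"
      else if ("Tv+" : String) == g then some "tvplus"
      else none := by
  have h : bReverse = PySem.Dict.mk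
      [("Netflix", "netflix"), ("Amazon", "amazon"), ("Disney", "disney"),
       ("HBO", "hbo"), ("Hbomax", "hbo"), ("BluTV", "hbo"), ("Tv+", "tvplus")] := by rfl
  rw [h]
  simp only [PySem.Dict.get?_mk_cons]
  split_ifs <;> rfl

-- membership in the matched set, as an any over the genres
theorem contains_bMatched (genres : List String) (s : PySem.Set String) (p : String) :
    PySem.Set.contains (genres.foldl
        (fun s g => match bReverse.get? g with
           | some q => PySem.Set.add s q
           | none => s) s) p
      = (PySem.Set.contains s p || genres.any (fun g => bReverse.get? g == some p)) := by
  induction genres generalizing s with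
  | nil => simp
  | cons g rest ih =>
      simp only [List.foldl_cons, List.any_cons, ih]
      cases h : bReverse.get? g with
      | none => simp
      | some q =>
          by_cases hq : q = p
          · subst hq
            simp [PySem.Set.mem_add]
          · have hq' : p ≠ q := fun hh => hq hh.symm
            have hb : (q == p) = false := beq_eq_false_iff_ne.mpr hq
            simp [PySem.Set.mem_add, hq', hb]

-- per-platform: hitting the reverse index at p is hitting p's name list
theorem hit_netflix (g : String) : (bReverse.get? g == some "netflix") = (["Netflix"] : List String).contains g := by
  rw [get?_bReverse]; split_ifs with h1 h2 h3 h4 h5 h6 h7 <;> simp_all [eq_comm (b := g)]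
theorem hit_amazon (g : String) : (bReverse.get? g == some "amazon") = (["Amazon"] : List String).contains g := by
  rw [get?_bReverse]; split_ifs with h1 h2 h3 h4 h5 h6 h7 <;> simp_all [eq_comm (b := g)]
theorem hit_disney (g : String) : (bReverse.get? g == some "disney") = (["Disney"] : List String).contains g := by
  rw [get?_bReverse]; split_ifs with h1 h2 h3 h4 h5 h6 h7 <;> simp_all [eq_comm (b := g)]
theorem hit_hbo (g : String) : (bReverse.get? g == some "hbo") = (["HBO", "Hbomax", "BluTV"] : List String).contains g := by
  rw [get?_bReverse]
  split_ifs with h1 h2 h3 h4 h5 h6 h7 <;> simp_all [eq_comm (b := g)]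
theorem hit_tvplus (g : String) : (bReverse.get? g == some "tvplus") = (["Tv+"] : List String).contains g := by
  rw [get?_bReverse]; split_ifs with h1 h2 h3 h4 h5 h6 h7 <;> simp_all [eq_comm (b := g)]

-- ===== VERDICT (by name: the statement is the Claim_ definition above) =====
theorem detect_platform_from_genres_spec : Claim_equal_detect_platform_from_genres := by
  intro genres _
  unfold Spec_detect_platform_from_genres detect_platform_from_genres detect_platform_from_genres_alt
  have hm : ∀ p, PySem.Set.contains (bMatched genres) p
      = genres.any (fun g => bReverse.get? g == some p) := by
    intro p
    unfold bMatched
    rw [contains_bMatched]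
    simp [PySem.Set.empty]
  by_cases hnil : genres = []
  · subst hnil; rfl
  · simp only [hnil, if_false]
    show aOuter genres PLATFORM_GENRES = bScan (bMatched genres) (PLATFORM_GENRES.map Prod.fst)
    simp only [PLATFORM_GENRES, List.map, aOuter, bScan, aInner_eq, hm]
    rw [PySem.List.any_congr_mem (g := fun g => (["Netflix"] : List String).contains g) (fun g _ => hit_netflix g),
        PySem.List.any_congr_mem (g := fun g => (["Amazon"] : List String).contains g) (fun g _ => hit_amazon g),
        PySem.List.any_congr_mem (g := fun g => (["Disney"] : List String).contains g) (fun g _ => hit_disney g),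
        PySem.List.any_congr_mem (g := fun g => (["HBO", "Hbomax", "BluTV"] : List String).contains g) (fun g _ => hit_hbo g),
        PySem.List.any_congr_mem (g := fun g => (["Tv+"] : List String).contains g) (fun g _ => hit_tvplus g)]
    by_cases h1 : genres.any (fun g => (["Netflix"] : List String).contains g) <;>
    by_cases h2 : genres.any (fun g => (["Amazon"] : List String).contains g) <;>
    by_cases h3 : genres.any (fun g => (["Disney"] : List String).contains g) <;>
    by_cases h4 : genres.any (fun g => (["HBO", "Hbomax", "BluTV"] : List String).contains g) <;>
    by_cases h5 : genres.any (fun g => (["Tv+"] : List String).contains g) <;>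
      simp_all
    all_goals (by_cases hx : ∃ x ∈ genres, x = "HBO" ∨ x = "Hbomax" ∨ x = "BluTV" <;> simp [hx])
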